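-- pv_equiv track=rewrite | github.com/polyai/adk | docs/scripts/update_docs.py | build_docs_block
-- ===== SOURCE A (Python) =====
-- DOCS_CHAR_LIMIT = 600_000
--
-- def build_docs_block(docs: dict[str, str]) -> str:
--     """Render all docs as a single block, truncated if needed."""
--     lines: list[str] = []
--     total = 0
--     for path, content in docs.items():
--         entry = f"### {path}\n{content}\n---\n"
--         if total + len(entry) > DOCS_CHAR_LIMIT:
--             lines.append("[remaining docs truncated to fit context]")
--             break
--         lines.append(entry)
--         total += len(entry)
--     return "\n".join(lines)
-- ===== SOURCE B (Python) =====
-- DOCS_CHAR_LIMIT = 600_000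
--
--
-- def build_docs_block(docs: dict[str, str]) -> str:
--     """Render all docs as a single block, truncated if needed.
--
--     Build-then-slice: format every entry, take prefix sums of their lengths,
--     cut at the first overflow and append the truncation marker.
--     """
--     entries = [f"### {path}\n{content}\n---\n" for path, content in docs.items()]
--     cums = []
--     running = 0
--     for e in entries:
--         running += len(e)
--         cums.append(running)
--     idx = next((i for i, t in enumerate(cums) if t > DOCS_CHAR_LIMIT), None)
--     if idx is None:
--         return "\n".join(entries)
--     return "\n".join(entries[:idx] + ["[remaining docs truncated to fit context]"])
-- ===== Notes on version B (the rewrite author's own statement) =====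
-- stated objective: alternative
-- what changed: Replaced the interleaved accumulate-and-break loop with a build-then-slice pipeline: format all entries, compute prefix sums of their lengths, find the first overflow index, slice and append the marker.
import Mathlib
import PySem

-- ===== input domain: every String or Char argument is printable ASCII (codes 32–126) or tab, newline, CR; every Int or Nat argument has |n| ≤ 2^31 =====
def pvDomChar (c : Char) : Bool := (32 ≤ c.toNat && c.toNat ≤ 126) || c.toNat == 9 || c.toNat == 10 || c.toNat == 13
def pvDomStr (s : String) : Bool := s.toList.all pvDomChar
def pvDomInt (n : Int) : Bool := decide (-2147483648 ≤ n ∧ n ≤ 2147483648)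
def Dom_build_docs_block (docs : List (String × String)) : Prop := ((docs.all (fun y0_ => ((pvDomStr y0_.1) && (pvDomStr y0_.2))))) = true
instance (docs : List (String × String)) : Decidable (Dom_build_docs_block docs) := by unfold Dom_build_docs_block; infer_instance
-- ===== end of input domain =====

-- B replaces A's interleaved accumulate-and-break loop with a build-then-slice pipeline
-- (format all entries, prefix sums of lengths, cut at first overflow): an alternative
-- decomposition of the same cost.

-- ===== PORT A =====
-- A's loop: accumulate entries and a running total, break with a marker on first overflow.
def pvLoopA : List (String × String) → Int → List String
  | [], _ => []
  | (path, content) :: rest, total =>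
    let entry := "### " ++ path ++ "\n" ++ content ++ "\n---\n"
    if total + PySem.Str.len entry > 600000 then
      ["[remaining docs truncated to fit context]"]
    else
      entry :: pvLoopA rest (total + PySem.Str.len entry)

def build_docs_block (docs : List (String × String)) : String :=
  PySem.Str.join "\n" (pvLoopA docs 0)

-- ===== PORT B =====
-- running prefix sums of the entry lengths (the cums loop in Source B)
def pvCums : List Int → Int → List Int
  | [], _ => []
  | l :: rest, running => (running + l) :: pvCums rest (running + l)

def build_docs_block_alt (docs : List (String × String)) : String :=
  let entries := docs.map (fun pc => "### " ++ pc.1 ++ "\n" ++ pc.2 ++ "\n---\n")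
  let cums := pvCums (entries.map PySem.Str.len) 0
  match List.findIdx? (fun t => t > 600000) cums with
  | none => PySem.Str.join "\n" entries
  | some i => PySem.Str.join "\n" (entries.take i ++ ["[remaining docs truncated to fit context]"])

-- ===== PRECONDITION & SPEC =====
def Spec_build_docs_block (docs : List (String × String)) (out : String) : Prop := out = build_docs_block_alt docs
instance (docs : List (String × String)) (out : String) : Decidable (Spec_build_docs_block docs out) := by unfold Spec_build_docs_block; infer_instance

-- ===== CLAIM (what is proved, stated in full; the proofs are below) =====
def Claim_equal_build_docs_block : Prop := ∀ (docs : List (String × String)), Dom_build_docs_block docs → Spec_build_docs_block docs (build_docs_block docs)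

-- ===== LEMMAS AND PROOFS =====

-- A's break-loop equals B's slice of the entry list at the first prefix-sum overflow,
-- generalized over the running total.
theorem pvLoopA_eq (docs : List (String × String)) (total : Int) :
    pvLoopA docs total =
      (match List.findIdx? (fun t => t > 600000)
          (pvCums ((docs.map (fun pc => "### " ++ pc.1 ++ "\n" ++ pc.2 ++ "\n---\n")).map PySem.Str.len) total) with
       | none => docs.map (fun pc => "### " ++ pc.1 ++ "\n" ++ pc.2 ++ "\n---\n")
       | some i => (docs.map (fun pc => "### " ++ pc.1 ++ "\n" ++ pc.2 ++ "\n---\n")).take i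
                     ++ ["[remaining docs truncated to fit context]"]) := by
  induction docs generalizing total with
  | nil => simp [pvLoopA, pvCums]
  | cons d rest ih =>
    obtain ⟨path, content⟩ := d
    simp only [pvLoopA, List.map_cons, List.map_map, pvCums, List.findIdx?_cons]
    rw [ih]
    simp only [List.map_map]
    generalize PySem.Str.len ("### " ++ path ++ "\n" ++ content ++ "\n---\n") = L
    by_cases h : total + L > 600000
    · simp [h]
    · simp only [h, if_false, decide_false]
      cases List.findIdx? (fun t => t > 600000)
          (pvCums (List.map (PySem.Str.len ∘ fun pc => "### " ++ pc.1 ++ "\n" ++ pc.2 ++ "\n---\n") rest)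
            (total + L)) with
      | none => simp
      | some i => simp [List.take_succ_cons]

-- ===== VERDICT (by name: the statement is the Claim_ definition above) =====
theorem build_docs_block_spec : Claim_equal_build_docs_block := by
  intro docs _
  unfold Spec_build_docs_block build_docs_block build_docs_block_alt
  dsimp only
  rw [pvLoopA_eq docs 0]
  cases List.findIdx? (fun t => t > 600000)
      (pvCums ((docs.map (fun pc => "### " ++ pc.1 ++ "\n" ++ pc.2 ++ "\n---\n")).map PySem.Str.len) 0) with
  | none => rfl
  | some i => rfl
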